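-- pv_equiv track=rewrite | github.com/cernat-catalin/advent_of_code_2019 | day3/main.py | find_all_intersections
-- ===== SOURCE A (Python) =====
-- def lines_intersection(line1, line2):
--     (p1, p2, _) = line1
--     (p3, p4, _) = line2
--
--     if (p1[0] == p2[0] and p3[1] == p4[1]
--             and ((p3[0] <= p1[0] and p1[0] <= p4[0]) or (p4[0] <= p1[0] and p1[0] <= p3[0]))
--             and ((p1[1] <= p3[1] and p3[1] <= p2[1]) or (p2[1] <= p3[1] and p3[1] <= p1[1]))):
--         return True, (p1[0], p3[1])
--     elif (p1[1] == p2[1] and p3[0] == p4[0]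
--             and ((p1[0] <= p3[0] and p3[0] <= p2[0]) or (p2[0] <= p3[0] and p3[0] <= p1[0]))
--             and ((p3[1] <= p1[1] and p1[1] <= p4[1]) or (p4[1] <= p1[1] and p1[1] <= p3[1]))):
--         return True, (p3[0], p1[1])
--     else:
--         return False, None
--
-- def find_all_intersections(lines1, lines2):
--     intersections = []
--     for line1 in lines1:
--         for line2 in lines2:
--             did_intersect, point = lines_intersection(line1, line2)
--             if did_intersect and point != (0, 0):
--                 intersections.append((line1, line2, point))
--     return intersections
-- ===== SOURCE B (Python) =====
-- def _merge_by_index(a, b):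
--     """Merge two index-sorted streams of (index, item); on an equal index the
--     two items coincide, so one copy is kept."""
--     res = []
--     i = k = 0
--     while i < len(a) and k < len(b):
--         if a[i][0] < b[k][0]:
--             res.append(a[i]); i += 1
--         elif b[k][0] < a[i][0]:
--             res.append(b[k]); k += 1
--         else:
--             res.append(a[i]); i += 1; k += 1
--     res.extend(a[i:])
--     res.extend(b[k:])
--     return res
--
-- def find_all_intersections(lines1, lines2):
--     # Partition lines2 once by orientation; each line1 is probed only against
--     # the perpendicular partition, and the two index-sorted hit streams are
--     # merged to restore the original lines2 order.
--     horiz = [(j, l) for j, l in enumerate(lines2) if l[0][1] == l[1][1]]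
--     vert = [(j, l) for j, l in enumerate(lines2) if l[0][0] == l[1][0]]
--     out = []
--     for line1 in lines1:
--         (x1, y1), (x2, y2), _ = line1
--         h1 = []
--         if x1 == x2:
--             for j, l2 in horiz:
--                 (x3, y3), (x4, y4), _ = l2
--                 if (min(x3, x4) <= x1 <= max(x3, x4)
--                         and min(y1, y2) <= y3 <= max(y1, y2)
--                         and (x1, y3) != (0, 0)):
--                     h1.append((j, (line1, l2, (x1, y3))))
--         h2 = []
--         if y1 == y2:
--             for j, l2 in vert:
--                 (x3, y3), (x4, y4), _ = l2
--                 if (min(x1, x2) <= x3 <= max(x1, x2)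
--                         and min(y3, y4) <= y1 <= max(y3, y4)
--                         and (x3, y1) != (0, 0)):
--                     h2.append((j, (line1, l2, (x3, y1))))
--         out.extend(t for _, t in _merge_by_index(h1, h2))
--     return out
-- ===== Notes on version B (the rewrite author's own statement) =====
-- stated objective: faster
-- what changed: B partitions lines2 once by orientation into index-tagged horizontal and vertical lists, probes each line1 only against the perpendicular partition (parallel pairs are never examined), and merges the two index-sorted hit streams to restore the original lines2 order, instead of A's full n*m double loop testing both branch conditions on every pair.
import Mathlib
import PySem

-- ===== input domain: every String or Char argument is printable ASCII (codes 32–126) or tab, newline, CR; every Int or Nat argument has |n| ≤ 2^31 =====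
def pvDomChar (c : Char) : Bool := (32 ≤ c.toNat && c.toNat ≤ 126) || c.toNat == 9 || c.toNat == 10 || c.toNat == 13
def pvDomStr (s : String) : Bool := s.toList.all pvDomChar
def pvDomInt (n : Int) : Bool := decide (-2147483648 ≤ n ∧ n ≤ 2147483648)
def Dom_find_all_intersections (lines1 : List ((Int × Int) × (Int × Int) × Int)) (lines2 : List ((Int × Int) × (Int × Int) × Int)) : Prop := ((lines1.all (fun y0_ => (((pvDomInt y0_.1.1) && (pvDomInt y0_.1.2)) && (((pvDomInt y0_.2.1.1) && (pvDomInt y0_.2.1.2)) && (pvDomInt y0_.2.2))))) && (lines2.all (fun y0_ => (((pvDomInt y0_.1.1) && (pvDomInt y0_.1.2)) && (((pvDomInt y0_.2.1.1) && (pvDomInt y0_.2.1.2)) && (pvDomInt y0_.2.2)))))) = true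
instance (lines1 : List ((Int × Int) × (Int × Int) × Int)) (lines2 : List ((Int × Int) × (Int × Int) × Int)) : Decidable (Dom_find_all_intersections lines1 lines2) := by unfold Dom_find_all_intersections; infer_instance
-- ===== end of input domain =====

-- B partitions lines2 by orientation and probes each line1 only against the
-- perpendicular partition, merging two index-sorted hit streams (objective: faster,
-- measured: parallel pairs are never examined).

-- ===== PORT A =====
def lines_intersection (line1 line2 : (Int × Int) × (Int × Int) × Int) :
    Bool × Option (Int × Int) :=
  let p1 := line1.1; let p2 := line1.2.1
  let p3 := line2.1; let p4 := line2.2.1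
  if p1.1 = p2.1 ∧ p3.2 = p4.2
      ∧ ((p3.1 ≤ p1.1 ∧ p1.1 ≤ p4.1) ∨ (p4.1 ≤ p1.1 ∧ p1.1 ≤ p3.1))
      ∧ ((p1.2 ≤ p3.2 ∧ p3.2 ≤ p2.2) ∨ (p2.2 ≤ p3.2 ∧ p3.2 ≤ p1.2)) then
    (true, some (p1.1, p3.2))
  else if p1.2 = p2.2 ∧ p3.1 = p4.1
      ∧ ((p1.1 ≤ p3.1 ∧ p3.1 ≤ p2.1) ∨ (p2.1 ≤ p3.1 ∧ p3.1 ≤ p1.1))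
      ∧ ((p3.2 ≤ p1.2 ∧ p1.2 ≤ p4.2) ∨ (p4.2 ≤ p1.2 ∧ p1.2 ≤ p3.2)) then
    (true, some (p3.1, p1.2))
  else
    (false, none)

def find_all_intersections (lines1 : List ((Int × Int) × (Int × Int) × Int)) (lines2 : List ((Int × Int) × (Int × Int) × Int)) : List (((Int × Int) × (Int × Int) × Int) × ((Int × Int) × (Int × Int) × Int) × (Int × Int)) :=
  lines1.foldl (fun intersections line1 =>
    lines2.foldl (fun intersections line2 =>
      match lines_intersection line1 line2 with
      | (true, some point) =>
          if point ≠ ((0 : Int), (0 : Int)) then intersections ++ [(line1, line2, point)]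
          else intersections
      | _ => intersections) intersections) []

-- ===== PORT B =====
-- two-pointer merge of two index-sorted streams; on an equal index one copy is kept
def pv_merge {T : Type} : List (Int × T) → List (Int × T) → List (Int × T)
  | [], ys => ys
  | x :: xs, [] => x :: xs
  | x :: xs, y :: ys =>
    if x.1 < y.1 then x :: pv_merge xs (y :: ys)
    else if y.1 < x.1 then y :: pv_merge (x :: xs) ys
    else x :: pv_merge xs ys
termination_by a b => a.length + b.length

def find_all_intersections_alt (lines1 : List ((Int × Int) × (Int × Int) × Int)) (lines2 : List ((Int × Int) × (Int × Int) × Int)) : List (((Int × Int) × (Int × Int) × Int) × ((Int × Int) × (Int × Int) × Int) × (Int × Int)) :=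
  let horiz := (PySem.List.enumerate lines2).filter (fun jl => jl.2.1.2 == jl.2.2.1.2)
  let vert := (PySem.List.enumerate lines2).filter (fun jl => jl.2.1.1 == jl.2.2.1.1)
  lines1.foldl (fun out line1 =>
    let x1 := line1.1.1; let y1 := line1.1.2
    let x2 := line1.2.1.1; let y2 := line1.2.1.2
    let h1 :=
      if x1 = x2 then
        horiz.foldl (fun acc jl =>
          if min jl.2.1.1 jl.2.2.1.1 ≤ x1 ∧ x1 ≤ max jl.2.1.1 jl.2.2.1.1
              ∧ min y1 y2 ≤ jl.2.1.2 ∧ jl.2.1.2 ≤ max y1 y2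
              ∧ ((x1, jl.2.1.2) : Int × Int) ≠ (0, 0) then
            acc ++ [(jl.1, (line1, jl.2, (x1, jl.2.1.2)))]
          else acc) []
      else []
    let h2 :=
      if y1 = y2 then
        vert.foldl (fun acc jl =>
          if min x1 x2 ≤ jl.2.1.1 ∧ jl.2.1.1 ≤ max x1 x2
              ∧ min jl.2.1.2 jl.2.2.1.2 ≤ y1 ∧ y1 ≤ max jl.2.1.2 jl.2.2.1.2
              ∧ ((jl.2.1.1, y1) : Int × Int) ≠ (0, 0) then
            acc ++ [(jl.1, (line1, jl.2, (jl.2.1.1, y1)))]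
          else acc) []
      else []
    out ++ (pv_merge h1 h2).map (fun m => m.2)) []

-- ===== PRECONDITION & SPEC =====
def Spec_find_all_intersections (lines1 : List ((Int × Int) × (Int × Int) × Int)) (lines2 : List ((Int × Int) × (Int × Int) × Int)) (out : List (((Int × Int) × (Int × Int) × Int) × ((Int × Int) × (Int × Int) × Int) × (Int × Int))) : Prop := out = find_all_intersections_alt lines1 lines2
instance (lines1 : List ((Int × Int) × (Int × Int) × Int)) (lines2 : List ((Int × Int) × (Int × Int) × Int)) (out : List (((Int × Int) × (Int × Int) × Int) × ((Int × Int) × (Int × Int) × Int) × (Int × Int))) : Decidable (Spec_find_all_intersections lines1 lines2 out) := by unfold Spec_find_all_intersections; infer_instance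

-- ===== CLAIM (what is proved, stated in full; the proofs are below) =====
def Claim_equal_find_all_intersections : Prop := ∀ (lines1 : List ((Int × Int) × (Int × Int) × Int)) (lines2 : List ((Int × Int) × (Int × Int) × Int)), Dom_find_all_intersections lines1 lines2 → Spec_find_all_intersections lines1 lines2 (find_all_intersections lines1 lines2)

-- ===== LEMMAS AND PROOFS =====

-- per-pair emission of A (the elif chain, keyed / unkeyed)
def pvG (a b : (Int × Int) × (Int × Int) × Int) :
    List (((Int × Int) × (Int × Int) × Int) × ((Int × Int) × (Int × Int) × Int) × (Int × Int)) :=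
  match lines_intersection a b with
  | (true, some pt) => if pt ≠ ((0 : Int), (0 : Int)) then [(a, b, pt)] else []
  | _ => []

def pvK (a : (Int × Int) × (Int × Int) × Int)
    (jb : Int × ((Int × Int) × (Int × Int) × Int)) :
    List (Int × (((Int × Int) × (Int × Int) × Int) × ((Int × Int) × (Int × Int) × Int) × (Int × Int))) :=
  (pvG a jb.2).map (fun t => (jb.1, t))

-- per-pair emission of B's two probes
def pvK1 (a : (Int × Int) × (Int × Int) × Int)
    (jb : Int × ((Int × Int) × (Int × Int) × Int)) :
    List (Int × (((Int × Int) × (Int × Int) × Int) × ((Int × Int) × (Int × Int) × Int) × (Int × Int))) :=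
  if a.1.1 = a.2.1.1 ∧ jb.2.1.2 = jb.2.2.1.2
      ∧ min jb.2.1.1 jb.2.2.1.1 ≤ a.1.1 ∧ a.1.1 ≤ max jb.2.1.1 jb.2.2.1.1
      ∧ min a.1.2 a.2.1.2 ≤ jb.2.1.2 ∧ jb.2.1.2 ≤ max a.1.2 a.2.1.2
      ∧ ((a.1.1, jb.2.1.2) : Int × Int) ≠ (0, 0) then
    [(jb.1, (a, jb.2, (a.1.1, jb.2.1.2)))]
  else []

def pvK2 (a : (Int × Int) × (Int × Int) × Int)
    (jb : Int × ((Int × Int) × (Int × Int) × Int)) :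
    List (Int × (((Int × Int) × (Int × Int) × Int) × ((Int × Int) × (Int × Int) × Int) × (Int × Int))) :=
  if a.1.2 = a.2.1.2 ∧ jb.2.1.1 = jb.2.2.1.1
      ∧ min a.1.1 a.2.1.1 ≤ jb.2.1.1 ∧ jb.2.1.1 ≤ max a.1.1 a.2.1.1
      ∧ min jb.2.1.2 jb.2.2.1.2 ≤ a.1.2 ∧ a.1.2 ≤ max jb.2.1.2 jb.2.2.1.2
      ∧ ((jb.2.1.1, a.1.2) : Int × Int) ≠ (0, 0) then
    [(jb.1, (a, jb.2, (jb.2.1.1, a.1.2)))]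
  else []

-- shape lemma for one cell: how A's elif relates to B's two probes
theorem pv_cell (a : (Int × Int) × (Int × Int) × Int)
    (jb : Int × ((Int × Int) × (Int × Int) × Int)) :
    (pvK1 a jb = [] ∧ pvK2 a jb = [] ∧ pvK a jb = []) ∨
    (∃ u, pvK1 a jb = [(jb.1, u)] ∧ pvK2 a jb = [] ∧ pvK a jb = [(jb.1, u)]) ∨
    (∃ u, pvK1 a jb = [] ∧ pvK2 a jb = [(jb.1, u)] ∧ pvK a jb = [(jb.1, u)]) ∨
    (∃ u v, pvK1 a jb = [(jb.1, u)] ∧ pvK2 a jb = [(jb.1, v)] ∧ pvK a jb = [(jb.1, u)]) := by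
  obtain ⟨⟨x1, y1⟩, ⟨x2, y2⟩, s1⟩ := a
  obtain ⟨j, ⟨x3, y3⟩, ⟨x4, y4⟩, s2⟩ := jb
  simp only [pvK, pvG, pvK1, pvK2, lines_intersection]
  split_ifs <;> dsimp only <;> (try split_ifs) <;>
    first
      | exact Or.inl ⟨rfl, rfl, rfl⟩
      | exact Or.inr (Or.inl ⟨_, rfl, rfl, rfl⟩)
      | exact Or.inr (Or.inr (Or.inl ⟨_, rfl, rfl, rfl⟩))
      | exact Or.inr (Or.inr (Or.inr ⟨_, _, rfl, rfl, rfl⟩))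
      | (exfalso; simp only [ne_eq, Prod.mk.injEq, not_and, not_or] at *; omega)

-- keys emitted for an enumerated pair are that pair's index
theorem pvK1_fst {a : (Int × Int) × (Int × Int) × Int}
    {jb : Int × ((Int × Int) × (Int × Int) × Int)}
    {x : Int × (((Int × Int) × (Int × Int) × Int) × ((Int × Int) × (Int × Int) × Int) × (Int × Int))}
    (hx : x ∈ pvK1 a jb) : x.1 = jb.1 := by
  unfold pvK1 at hx
  split at hx <;> simp_all

theorem pvK2_fst {a : (Int × Int) × (Int × Int) × Int}
    {jb : Int × ((Int × Int) × (Int × Int) × Int)}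
    {x : Int × (((Int × Int) × (Int × Int) × Int) × ((Int × Int) × (Int × Int) × Int) × (Int × Int))}
    (hx : x ∈ pvK2 a jb) : x.1 = jb.1 := by
  unfold pvK2 at hx
  split at hx <;> simp_all

theorem pv_merge_nil_right {T : Type} (a : List (Int × T)) : pv_merge a [] = a := by
  cases a <;> simp [pv_merge]

theorem pv_merge_cons_left {T : Type} (x : Int × T) (a b : List (Int × T))
    (hb : ∀ y ∈ b, x.1 < y.1) : pv_merge (x :: a) b = x :: pv_merge a b := by
  cases b with
  | nil => rw [pv_merge_nil_right, pv_merge_nil_right]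
  | cons y ys =>
    have : x.1 < y.1 := hb y (List.mem_cons_self)
    simp [pv_merge, this]

theorem pv_merge_cons_right {T : Type} (x : Int × T) (a b : List (Int × T))
    (ha : ∀ y ∈ a, x.1 < y.1) : pv_merge a (x :: b) = x :: pv_merge a b := by
  cases a with
  | nil => simp [pv_merge]
  | cons y ys =>
    have h : x.1 < y.1 := ha y (List.mem_cons_self)
    have h1 : ¬ y.1 < x.1 := by omega
    simp [pv_merge, h1, h]

theorem pv_merge_cons_tie {T : Type} (x x' : Int × T) (a b : List (Int × T))
    (h : x.1 = x'.1) : pv_merge (x :: a) (x' :: b) = x :: pv_merge a b := by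
  have h1 : ¬ x.1 < x'.1 := by omega
  have h2 : ¬ x'.1 < x.1 := by omega
  simp [pv_merge, h1, h2]

-- keys in the flatMap over an enumeration from s are ≥ s
theorem keys_ge {f : (Int × ((Int × Int) × (Int × Int) × Int)) →
      List (Int × (((Int × Int) × (Int × Int) × Int) × ((Int × Int) × (Int × Int) × Int) × (Int × Int)))}
    (hf : ∀ jb x, x ∈ f jb → x.1 = jb.1)
    (t : List ((Int × Int) × (Int × Int) × Int)) (s : Int)
    {x : Int × (((Int × Int) × (Int × Int) × Int) × ((Int × Int) × (Int × Int) × Int) × (Int × Int))}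
    (hx : x ∈ (PySem.List.enumerate t s).flatMap f) : s ≤ x.1 := by
  rcases List.mem_flatMap.mp hx with ⟨jb, hjb, hxf⟩
  rcases (PySem.List.mem_enumerate_iff t s jb).mp hjb with ⟨k, hk, rfl⟩
  rw [hf _ _ hxf]
  simp

-- the central lemma: merging B's two probe streams reproduces A's elif scan
theorem merge_flat (a : (Int × Int) × (Int × Int) × Int)
    (t : List ((Int × Int) × (Int × Int) × Int)) (s : Int) :
    pv_merge ((PySem.List.enumerate t s).flatMap (pvK1 a))
      ((PySem.List.enumerate t s).flatMap (pvK2 a))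
    = (PySem.List.enumerate t s).flatMap (pvK a) := by
  induction t generalizing s with
  | nil => simp [PySem.List.enumerate_nil, pv_merge]
  | cons b tl ih =>
    rw [PySem.List.enumerate_cons]
    simp only [List.flatMap_cons]
    have hr1 : ∀ y ∈ (PySem.List.enumerate tl (s + 1)).flatMap (pvK1 a), s < y.1 := by
      intro y hy; have := keys_ge (fun jb x h => pvK1_fst h) tl (s + 1) hy; omega
    have hr2 : ∀ y ∈ (PySem.List.enumerate tl (s + 1)).flatMap (pvK2 a), s < y.1 := by
      intro y hy; have := keys_ge (fun jb x h => pvK2_fst h) tl (s + 1) hy; omega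
    rcases pv_cell a (s, b) with ⟨h1, h2, h3⟩ | ⟨u, h1, h2, h3⟩ | ⟨u, h1, h2, h3⟩ | ⟨u, v, h1, h2, h3⟩
    · rw [h1, h2, h3]; simp only [List.nil_append]; exact ih (s + 1)
    · rw [h1, h2, h3]
      simp only [List.cons_append, List.nil_append]
      rw [pv_merge_cons_left _ _ _ (fun y hy => hr2 y hy), ih (s + 1)]
    · rw [h1, h2, h3]
      simp only [List.cons_append, List.nil_append]
      rw [pv_merge_cons_right _ _ _ (fun y hy => hr1 y hy), ih (s + 1)]
    · rw [h1, h2, h3]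
      simp only [List.cons_append, List.nil_append]
      rw [pv_merge_cons_tie ((s, b).1, u) ((s, b).1, v) _ _ rfl, ih (s + 1)]

-- A as a double flatMap
theorem A_char (lines1 lines2 : List ((Int × Int) × (Int × Int) × Int)) :
    find_all_intersections lines1 lines2 =
      lines1.flatMap (fun a => lines2.flatMap (fun b => pvG a b)) := by
  have hbody : ∀ a : (Int × Int) × (Int × Int) × Int,
      (fun (acc : List (((Int × Int) × (Int × Int) × Int) × ((Int × Int) × (Int × Int) × Int) × (Int × Int))) b =>
        match lines_intersection a b with
        | (true, some point) =>
            if point ≠ ((0 : Int), (0 : Int)) then acc ++ [(a, b, point)] else acc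
        | _ => acc) = fun acc b => acc ++ pvG a b := by
    intro a; funext acc b
    rcases h : lines_intersection a b with ⟨bl, op⟩
    cases bl <;> cases op <;> simp only [pvG, h] <;> first | (split <;> simp) | simp
  have houter :
      (fun (acc : List (((Int × Int) × (Int × Int) × Int) × ((Int × Int) × (Int × Int) × Int) × (Int × Int))) a =>
        List.foldl (fun acc b =>
          match lines_intersection a b with
          | (true, some point) =>
              if point ≠ ((0 : Int), (0 : Int)) then acc ++ [(a, b, point)] else acc
          | _ => acc) acc lines2)
      = fun acc a => acc ++ lines2.flatMap (fun b => pvG a b) := by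
    funext acc a
    rw [hbody a, PySem.List.foldl_append_eq_flatMap]
  unfold find_all_intersections
  rw [houter, PySem.List.foldl_append_eq_flatMap, List.nil_append]

-- flatMap over a filter = flatMap with a guarded body
theorem flatMap_filter {α β : Type} (p : α → Bool) (f : α → List β) (l : List α) :
    (l.filter p).flatMap f = l.flatMap (fun x => if p x then f x else []) := by
  induction l with
  | nil => rfl
  | cons x t ih => by_cases h : p x <;> simp [h, ih]

-- B's first probe stream (guarded scan of the horizontal partition)
theorem h1_char (a : (Int × Int) × (Int × Int) × Int)
    (lines2 : List ((Int × Int) × (Int × Int) × Int)) :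
    (if a.1.1 = a.2.1.1 then
      ((PySem.List.enumerate lines2).filter (fun jl => jl.2.1.2 == jl.2.2.1.2)).foldl (fun acc jl =>
        if min jl.2.1.1 jl.2.2.1.1 ≤ a.1.1 ∧ a.1.1 ≤ max jl.2.1.1 jl.2.2.1.1
            ∧ min a.1.2 a.2.1.2 ≤ jl.2.1.2 ∧ jl.2.1.2 ≤ max a.1.2 a.2.1.2
            ∧ ((a.1.1, jl.2.1.2) : Int × Int) ≠ (0, 0) then
          acc ++ [(jl.1, (a, jl.2, (a.1.1, jl.2.1.2)))]
        else acc) []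
    else []) = (PySem.List.enumerate lines2).flatMap (pvK1 a) := by
  split_ifs with hx
  · have hb : (fun (acc : List (Int × (((Int × Int) × (Int × Int) × Int) × ((Int × Int) × (Int × Int) × Int) × (Int × Int)))) jl =>
        if min jl.2.1.1 jl.2.2.1.1 ≤ a.1.1 ∧ a.1.1 ≤ max jl.2.1.1 jl.2.2.1.1
            ∧ min a.1.2 a.2.1.2 ≤ jl.2.1.2 ∧ jl.2.1.2 ≤ max a.1.2 a.2.1.2
            ∧ ((a.1.1, jl.2.1.2) : Int × Int) ≠ (0, 0) then
          acc ++ [(jl.1, (a, jl.2, (a.1.1, jl.2.1.2)))]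
        else acc)
        = fun acc (jl : Int × ((Int × Int) × (Int × Int) × Int)) => acc ++ (if min jl.2.1.1 jl.2.2.1.1 ≤ a.1.1 ∧ a.1.1 ≤ max jl.2.1.1 jl.2.2.1.1
            ∧ min a.1.2 a.2.1.2 ≤ jl.2.1.2 ∧ jl.2.1.2 ≤ max a.1.2 a.2.1.2
            ∧ ((a.1.1, jl.2.1.2) : Int × Int) ≠ (0, 0) then
          [(jl.1, (a, jl.2, (a.1.1, jl.2.1.2)))] else []) := by
      funext acc jl; split <;> simp
    rw [hb, PySem.List.foldl_append_eq_flatMap, List.nil_append, flatMap_filter]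
    apply List.flatMap_congr
    intro jl _
    by_cases hy : jl.2.1.2 = jl.2.2.1.2 <;>
      by_cases hr : min jl.2.1.1 jl.2.2.1.1 ≤ a.1.1 ∧ a.1.1 ≤ max jl.2.1.1 jl.2.2.1.1
          ∧ min a.1.2 a.2.1.2 ≤ jl.2.1.2 ∧ jl.2.1.2 ≤ max a.1.2 a.2.1.2
          ∧ ((a.1.1, jl.2.1.2) : Int × Int) ≠ (0, 0) <;>
      simp [pvK1, hx, hy, hr]
  · symm
    rw [List.flatMap_eq_nil_iff]
    intro jb _
    simp [pvK1, hx]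

theorem h2_char (a : (Int × Int) × (Int × Int) × Int)
    (lines2 : List ((Int × Int) × (Int × Int) × Int)) :
    (if a.1.2 = a.2.1.2 then
      ((PySem.List.enumerate lines2).filter (fun jl => jl.2.1.1 == jl.2.2.1.1)).foldl (fun acc jl =>
        if min a.1.1 a.2.1.1 ≤ jl.2.1.1 ∧ jl.2.1.1 ≤ max a.1.1 a.2.1.1
            ∧ min jl.2.1.2 jl.2.2.1.2 ≤ a.1.2 ∧ a.1.2 ≤ max jl.2.1.2 jl.2.2.1.2
            ∧ ((jl.2.1.1, a.1.2) : Int × Int) ≠ (0, 0) then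
          acc ++ [(jl.1, (a, jl.2, (jl.2.1.1, a.1.2)))]
        else acc) []
    else []) = (PySem.List.enumerate lines2).flatMap (pvK2 a) := by
  split_ifs with hx
  · have hb : (fun (acc : List (Int × (((Int × Int) × (Int × Int) × Int) × ((Int × Int) × (Int × Int) × Int) × (Int × Int)))) jl =>
        if min a.1.1 a.2.1.1 ≤ jl.2.1.1 ∧ jl.2.1.1 ≤ max a.1.1 a.2.1.1
            ∧ min jl.2.1.2 jl.2.2.1.2 ≤ a.1.2 ∧ a.1.2 ≤ max jl.2.1.2 jl.2.2.1.2
            ∧ ((jl.2.1.1, a.1.2) : Int × Int) ≠ (0, 0) then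
          acc ++ [(jl.1, (a, jl.2, (jl.2.1.1, a.1.2)))]
        else acc)
        = fun acc (jl : Int × ((Int × Int) × (Int × Int) × Int)) => acc ++ (if min a.1.1 a.2.1.1 ≤ jl.2.1.1 ∧ jl.2.1.1 ≤ max a.1.1 a.2.1.1
            ∧ min jl.2.1.2 jl.2.2.1.2 ≤ a.1.2 ∧ a.1.2 ≤ max jl.2.1.2 jl.2.2.1.2
            ∧ ((jl.2.1.1, a.1.2) : Int × Int) ≠ (0, 0) then
          [(jl.1, (a, jl.2, (jl.2.1.1, a.1.2)))] else []) := by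
      funext acc jl; split <;> simp
    rw [hb, PySem.List.foldl_append_eq_flatMap, List.nil_append, flatMap_filter]
    apply List.flatMap_congr
    intro jl _
    by_cases hy : jl.2.1.1 = jl.2.2.1.1 <;>
      by_cases hr : min a.1.1 a.2.1.1 ≤ jl.2.1.1 ∧ jl.2.1.1 ≤ max a.1.1 a.2.1.1
          ∧ min jl.2.1.2 jl.2.2.1.2 ≤ a.1.2 ∧ a.1.2 ≤ max jl.2.1.2 jl.2.2.1.2
          ∧ ((jl.2.1.1, a.1.2) : Int × Int) ≠ (0, 0) <;>
      simp [pvK2, hx, hy, hr]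
  · symm
    rw [List.flatMap_eq_nil_iff]
    intro jb _
    simp [pvK2, hx]

theorem map_snd_pvK (a : (Int × Int) × (Int × Int) × Int)
    (jb : Int × ((Int × Int) × (Int × Int) × Int)) :
    (pvK a jb).map (fun m => m.2) = pvG a jb.2 := by
  simp [pvK, List.map_map]

theorem flatMap_snd_enumerate {α β : Type} (xs : List α) (f : α → List β) :
    (PySem.List.enumerate xs 0).flatMap (fun p => f p.2) = xs.flatMap f := by
  have h := List.flatMap_map (fun p : Int × α => p.2) f (PySem.List.enumerate xs 0)
  rw [PySem.List.map_snd_enumerate] at h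
  exact h.symm

-- ===== VERDICT (by name: the statement is the Claim_ definition above) =====
theorem find_all_intersections_spec : Claim_equal_find_all_intersections := by
  intro lines1 lines2 _
  unfold Spec_find_all_intersections find_all_intersections_alt
  dsimp only
  have hbody :
      (fun (out : List (((Int × Int) × (Int × Int) × Int) × ((Int × Int) × (Int × Int) × Int) × (Int × Int))) line1 =>
        out ++ (pv_merge
          (if line1.1.1 = line1.2.1.1 then
            ((PySem.List.enumerate lines2).filter (fun jl => jl.2.1.2 == jl.2.2.1.2)).foldl (fun acc jl =>
              if min jl.2.1.1 jl.2.2.1.1 ≤ line1.1.1 ∧ line1.1.1 ≤ max jl.2.1.1 jl.2.2.1.1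
                  ∧ min line1.1.2 line1.2.1.2 ≤ jl.2.1.2 ∧ jl.2.1.2 ≤ max line1.1.2 line1.2.1.2
                  ∧ ((line1.1.1, jl.2.1.2) : Int × Int) ≠ (0, 0) then
                acc ++ [(jl.1, (line1, jl.2, (line1.1.1, jl.2.1.2)))]
              else acc) []
          else [])
          (if line1.1.2 = line1.2.1.2 then
            ((PySem.List.enumerate lines2).filter (fun jl => jl.2.1.1 == jl.2.2.1.1)).foldl (fun acc jl =>
              if min line1.1.1 line1.2.1.1 ≤ jl.2.1.1 ∧ jl.2.1.1 ≤ max line1.1.1 line1.2.1.1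
                  ∧ min jl.2.1.2 jl.2.2.1.2 ≤ line1.1.2 ∧ line1.1.2 ≤ max jl.2.1.2 jl.2.2.1.2
                  ∧ ((jl.2.1.1, line1.1.2) : Int × Int) ≠ (0, 0) then
                acc ++ [(jl.1, (line1, jl.2, (jl.2.1.1, line1.1.2)))]
              else acc) []
          else [])).map (fun m => m.2))
      = fun out line1 => out ++ (lines2.flatMap (fun b => pvG line1 b)) := by
    funext out line1
    rw [h1_char line1 lines2, h2_char line1 lines2, merge_flat line1 lines2 0]
    congr 1
    rw [List.map_flatMap]
    have hK : (fun jb => (pvK line1 jb).map (fun m => m.2))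
        = fun jb : Int × ((Int × Int) × (Int × Int) × Int) => pvG line1 jb.2 := by
      funext jb; exact map_snd_pvK line1 jb
    rw [hK]
    exact flatMap_snd_enumerate lines2 (fun b => pvG line1 b)
  rw [hbody, PySem.List.foldl_append_eq_flatMap, List.nil_append, A_char]
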